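-- pv_equiv track=rewrite | github.com/mateusz-gob1/financial-doc-agent | tools/pdf_parser.py | find_financial_section_pages
-- ===== SOURCE A (Python) =====
-- FINANCIAL_SECTION_KEYWORDS = [
--     "selected financial data",
--     "selected consolidated financial data",
--     "consolidated statements of operations",
--     "consolidated statements of comprehensive",
--     "consolidated balance sheet",
--     "consolidated statements of cash flows",
--     "item 5",       # 20-F: Operating and Financial Review
--     "item 18",      # 20-F: Financial Statements
--     "item 7",       # 10-K: Management's Discussion and Analysis
--     "item 8",       # 10-K: Financial Statements
-- ]
--
-- PAGES_AFTER_ANCHOR = 25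
--
-- def find_financial_section_pages(pages: list[str]) -> list[int]:
--     """
--     Scan pages for financial section keywords.
--     Returns a deduplicated sorted list of page indices to extract.
--
--     Matches only in the first 300 chars of a page (section headers),
--     not in body text where these phrases appear as cross-references.
--     Limits to the first 4 anchor points to avoid extracting the whole doc.
--     """
--     anchors: list[tuple[int, int]] = []  # (page_index, keyword_priority)
--
--     for i, page_text in enumerate(pages):
--         # Only look at the top of the page — section headers appear there
--         header_zone = page_text[:300].lower().strip()
--         for priority, keyword in enumerate(FINANCIAL_SECTION_KEYWORDS):
--             if keyword in header_zone:
--                 anchors.append((i, priority))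
--                 break
--
--     # Keep only the first 4 unique anchor pages (avoid over-extraction)
--     seen: set[int] = set()
--     selected: list[int] = []
--     for page_idx, _ in sorted(anchors, key=lambda x: x[0]):
--         if page_idx not in seen:
--             seen.add(page_idx)
--             for j in range(page_idx, min(page_idx + PAGES_AFTER_ANCHOR, len(pages))):
--                 selected.append(j)
--         if len(seen) >= 4:
--             break
--
--     return sorted(set(selected))
-- ===== SOURCE B (Python) =====
-- FINANCIAL_SECTION_KEYWORDS = [
--     "selected financial data",
--     "selected consolidated financial data",
--     "consolidated statements of operations",
--     "consolidated statements of comprehensive",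
--     "consolidated balance sheet",
--     "consolidated statements of cash flows",
--     "item 5",
--     "item 18",
--     "item 7",
--     "item 8",
-- ]
--
-- PAGES_AFTER_ANCHOR = 25
--
--
-- def find_financial_section_pages(pages: list[str]) -> list[int]:
--     # One forward pass collecting the first 4 anchor pages, then emit the
--     # union of their windows directly in sorted order (no sort, no set).
--     anchors: list[int] = []
--     for i, page_text in enumerate(pages):
--         if len(anchors) >= 4:
--             break
--         header_zone = page_text[:300].lower().strip()
--         if any(k in header_zone for k in FINANCIAL_SECTION_KEYWORDS):
--             anchors.append(i)
--     return [j for j in range(len(pages))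
--             if any(a <= j < a + PAGES_AFTER_ANCHOR for a in anchors)]
-- ===== Notes on version B (the rewrite author's own statement) =====
-- stated objective: simpler
-- what changed: Single forward pass collects the first 4 anchor page indices directly (dropping the unused keyword priority, the anchor sort and the set-based dedup), and the result is emitted in sorted order by filtering range(len(pages)) against the 4 anchor windows.
import Mathlib
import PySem

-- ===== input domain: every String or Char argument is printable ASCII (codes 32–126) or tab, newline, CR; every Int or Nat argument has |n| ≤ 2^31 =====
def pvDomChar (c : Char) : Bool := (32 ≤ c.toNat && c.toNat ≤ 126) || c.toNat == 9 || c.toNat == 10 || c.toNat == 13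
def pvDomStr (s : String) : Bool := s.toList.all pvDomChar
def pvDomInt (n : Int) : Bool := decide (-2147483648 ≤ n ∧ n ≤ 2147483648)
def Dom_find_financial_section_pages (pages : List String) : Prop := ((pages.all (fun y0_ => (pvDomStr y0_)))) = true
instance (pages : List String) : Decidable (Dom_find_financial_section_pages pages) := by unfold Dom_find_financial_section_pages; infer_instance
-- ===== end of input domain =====

-- B folds anchor collection into one early-stopping pass (first 4 anchor pages) and emits
-- the union of their 25-page windows directly in increasing order, dropping A's anchor
-- priority bookkeeping, the sort and the set-based dedup (objective: simpler).

-- ===== PORT A =====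
def pvKeywords : List String :=
  ["selected financial data",
   "selected consolidated financial data",
   "consolidated statements of operations",
   "consolidated statements of comprehensive",
   "consolidated balance sheet",
   "consolidated statements of cash flows",
   "item 5",
   "item 18",
   "item 7",
   "item 8"]

-- page_text[:300].lower().strip()
def pvHeader (s : String) : String :=
  PySem.Str.strip (PySem.Str.lower (PySem.Str.slice s none (some 300)))

-- the second loop of A, with its 'break' once 4 distinct anchor pages are seen
def pvSelLoop (n : Int) : List (Int × Int) → PySem.Set Int → List Int → List Int
  | [], _, sel => sel
  | pk :: rest, seen, sel =>
    let st :=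
      if PySem.Set.contains seen pk.1 then (seen, sel)
      else (PySem.Set.add seen pk.1,
            sel ++ PySem.List.pyRange pk.1 (min (pk.1 + 25) (n)) 1)
    if 4 ≤ st.1.length then st.2 else pvSelLoop n rest st.1 st.2

def find_financial_section_pages (pages : List String) : List Int :=
  let anchors : List (Int × Int) :=
    (PySem.List.enumerate pages 0).foldl (fun acc ip =>
      match (PySem.List.enumerate pvKeywords 0).find?
          (fun pk => PySem.Str.isIn pk.2 (pvHeader ip.2)) with
      | some pk => acc ++ [(ip.1, pk.1)]
      | none => acc) []
  let selected :=
    pvSelLoop (pages.length : Int) (PySem.List.sorted anchors (fun x => x.1) false)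
      PySem.Set.empty []
  PySem.List.sorted (PySem.Set.ofList selected) (fun x => x) false

-- ===== PORT B =====
-- B's single anchor pass with its 'break' when 4 anchors are collected
def pvAnchLoop : List (Int × String) → List Int → List Int
  | [], acc => acc
  | ip :: rest, acc =>
    if 4 ≤ acc.length then acc
    else pvAnchLoop rest
      (if pvKeywords.any (fun k => PySem.Str.isIn k (pvHeader ip.2)) then acc ++ [ip.1]
       else acc)

def find_financial_section_pages_alt (pages : List String) : List Int :=
  let anchors := pvAnchLoop (PySem.List.enumerate pages 0) []
  (PySem.List.pyRange 0 (pages.length : Int) 1).filter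
    (fun j => anchors.any (fun a => decide (a ≤ j) && decide (j < a + 25)))

-- ===== PRECONDITION & SPEC =====
def Spec_find_financial_section_pages (pages : List String) (out : List Int) : Prop := out = find_financial_section_pages_alt pages
instance (pages : List String) (out : List Int) : Decidable (Spec_find_financial_section_pages pages out) := by unfold Spec_find_financial_section_pages; infer_instance

-- ===== CLAIM (what is proved, stated in full; the proofs are below) =====
def Claim_equal_find_financial_section_pages : Prop := ∀ (pages : List String), Dom_find_financial_section_pages pages → Spec_find_financial_section_pages pages (find_financial_section_pages pages)

-- ===== LEMMAS AND PROOFS =====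

def pvMatch (s : String) : Bool :=
  pvKeywords.any (fun k => PySem.Str.isIn k (pvHeader s))

def pvPrio (s : String) : Int :=
  (((PySem.List.enumerate pvKeywords 0).find?
      (fun pk => PySem.Str.isIn pk.2 (pvHeader s))).getD (0, "")).1

def pvAnchors (pages : List String) : List (Int × Int) :=
  ((PySem.List.enumerate pages 0).filter (fun ip => pvMatch ip.2)).map
    (fun ip => (ip.1, pvPrio ip.2))

def pvRng (n : Int) (p : Int × Int) : List Int :=
  PySem.List.pyRange p.1 (min (p.1 + 25) n) 1

lemma pvFind_isSome (s : String) :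
    ((PySem.List.enumerate pvKeywords 0).find?
        (fun pk => PySem.Str.isIn pk.2 (pvHeader s))).isSome = pvMatch s := by
  rw [Bool.eq_iff_iff]
  simp [List.find?_isSome, pvMatch, List.any_eq_true,
    PySem.List.getElem_enumerate, List.mem_iff_getElem]

lemma pvAnchors_foldl (pages : List String) :
    (PySem.List.enumerate pages 0).foldl (fun acc ip =>
      match (PySem.List.enumerate pvKeywords 0).find?
          (fun pk => PySem.Str.isIn pk.2 (pvHeader ip.2)) with
      | some pk => acc ++ [(ip.1, pk.1)]
      | none => acc) [] = pvAnchors pages := by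
  have hstep : (fun (acc : List (Int × Int)) (ip : Int × String) =>
      match (PySem.List.enumerate pvKeywords 0).find?
          (fun pk => PySem.Str.isIn pk.2 (pvHeader ip.2)) with
      | some pk => acc ++ [(ip.1, pk.1)]
      | none => acc)
      = (fun acc ip => if pvMatch ip.2 then acc ++ [(ip.1, pvPrio ip.2)] else acc) := by
    funext acc ip
    cases h : (PySem.List.enumerate pvKeywords 0).find?
        (fun pk => PySem.Str.isIn pk.2 (pvHeader ip.2)) with
    | none =>
        have hm : pvMatch ip.2 = false := by rw [← pvFind_isSome ip.2, h]; rfl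
        simp [hm]
    | some pk =>
        have hm : pvMatch ip.2 = true := by rw [← pvFind_isSome ip.2, h]; rfl
        have hp : pvPrio ip.2 = pk.1 := by rw [pvPrio, h]; rfl
        simp [hm, hp]
  rw [hstep]
  simpa [pvAnchors] using PySem.List.foldl_append_if
    (fun (ip : Int × String) => pvMatch ip.2) (fun ip => (ip.1, pvPrio ip.2))
    (PySem.List.enumerate pages 0) []

lemma pvAnchors_pairwise (pages : List String) :
    (pvAnchors pages).Pairwise (fun a b => a.1 < b.1) := by
  rw [pvAnchors]
  refine List.Pairwise.map _ (fun a b h => h) ?_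
  exact (PySem.List.pairwise_lt_enumerate pages 0).filter _

lemma pvAnchors_nonneg (pages : List String) :
    ∀ p ∈ pvAnchors pages, 0 ≤ p.1 := by
  intro p hp
  rw [pvAnchors] at hp
  obtain ⟨ip, hip, rfl⟩ := List.mem_map.1 hp
  have := List.mem_filter.1 hip
  obtain ⟨k, hk, rfl⟩ := (PySem.List.mem_enumerate_iff pages 0 ip).1 this.1
  simp

lemma pvSelLoop_spec (n : Int) (as : List (Int × Int)) :
    ∀ (seen : PySem.Set Int) (sel : List Int),
    (as.map (·.1)).Nodup → (∀ p ∈ as, p.1 ∉ seen) → seen.length < 4 →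
    pvSelLoop n as seen sel = sel ++ (as.take (4 - seen.length)).flatMap (pvRng n) := by
  induction as with
  | nil => intro seen sel _ _ _; simp [pvSelLoop]
  | cons pk rest ih =>
    intro seen sel hnd hdis hlt
    have hmem : pk.1 ∉ seen := hdis pk (List.mem_cons_self ..)
    have hcont : PySem.Set.contains seen pk.1 = false := by
      rw [Bool.eq_false_iff]; intro h; exact hmem ((PySem.Set.contains_iff seen pk.1).1 h)
    rw [pvSelLoop, hcont]
    simp only [Bool.false_eq_true, if_false, PySem.Set.add_of_not_mem hmem,
      List.length_append, List.length_singleton]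
    by_cases h4 : 4 ≤ seen.length + 1
    · have h3 : seen.length = 3 := by omega
      rw [if_pos h4, h3]
      simp [pvRng]
    · rw [if_neg h4]
      have hnd' : (rest.map (·.1)).Nodup := (List.nodup_cons.1 hnd).2
      have hfst : pk.1 ∉ rest.map (·.1) := (List.nodup_cons.1 hnd).1
      have hdis' : ∀ p ∈ rest, p.1 ∉ seen ++ [pk.1] := by
        intro p hp
        simp only [List.mem_append, List.mem_singleton]
        rintro (h | h)
        · exact hdis p (List.mem_cons_of_mem _ hp) h
        · exact hfst (h ▸ List.mem_map_of_mem hp)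
      rw [ih _ _ hnd' hdis' (by simp only [List.length_append, List.length_singleton]; omega)]
      have harith : 4 - seen.length = (4 - (seen.length + 1)) + 1 := by omega
      rw [harith, List.take_succ_cons, List.flatMap_cons, List.length_append,
        List.length_singleton, List.append_assoc]
      rfl

lemma pvAnchLoop_spec (es : List (Int × String)) :
    ∀ acc : List Int,
    pvAnchLoop es acc
      = acc ++ ((es.filter (fun p => pvMatch p.2)).map (·.1)).take (4 - acc.length) := by
  induction es with
  | nil => intro acc; simp [pvAnchLoop]
  | cons e rest ih =>
    intro acc
    rw [pvAnchLoop]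
    by_cases h4 : 4 ≤ acc.length
    · rw [if_pos h4]
      have : 4 - acc.length = 0 := by omega
      simp [this]
    · rw [if_neg h4]
      by_cases hm : pvMatch e.2
      · rw [if_pos (by exact hm), ih (acc ++ [e.1])]
        have hf : List.filter (fun p => pvMatch p.2) (e :: rest)
            = e :: List.filter (fun p => pvMatch p.2) rest := by
          simp [hm]
        have harith : 4 - acc.length = (4 - (acc.length + 1)) + 1 := by omega
        rw [hf, List.map_cons, harith, List.take_succ_cons, List.length_append,
          List.length_singleton, List.append_assoc, List.singleton_append]
      · rw [if_neg (by exact hm)]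
        have hf : List.filter (fun p => pvMatch p.2) (e :: rest)
            = List.filter (fun p => pvMatch p.2) rest := by
          simp [hm]
        rw [ih acc, hf]

lemma pv_main (pages : List String) :
    find_financial_section_pages pages = find_financial_section_pages_alt pages := by
  simp only [find_financial_section_pages, find_financial_section_pages_alt]
  rw [pvAnchors_foldl, pvAnchLoop_spec, List.nil_append]
  set n : Int := (pages.length : Int) with hn
  have hpw := pvAnchors_pairwise pages
  rw [PySem.List.sorted_eq_self_of_pairwise _ _ (hpw.imp (fun h => le_of_lt h))]
  have hndfst : ((pvAnchors pages).map (·.1)).Nodup := by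
    rw [List.nodup_iff_pairwise_ne]
    exact (List.pairwise_map.2 (hpw.imp (fun h => ne_of_lt h)))
  rw [pvSelLoop_spec n (pvAnchors pages) PySem.Set.empty [] hndfst
    (by intro p _ h; simp [PySem.Set.empty] at h) (by simp [PySem.Set.empty])]
  rw [List.nil_append]
  -- both sides are now about take-4 anchors
  set t4 := (pvAnchors pages).take (4 - PySem.Set.empty.length) with ht4
  have ht4' : t4 = (pvAnchors pages).take 4 := by simp [ht4, PySem.Set.empty]
  have hmapfilter :
      ((PySem.List.enumerate pages 0).filter (fun p => pvMatch p.2)).map (·.1)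
        = (pvAnchors pages).map (·.1) := by
    rw [pvAnchors, List.map_map]; rfl
  rw [hmapfilter, ← List.map_take]
  -- final step: sorted(set(flatMap ranges)) = filter of pyRange
  refine PySem.List.sorted_eq_of_perm_of_pairwise_lt _ _ _ ?_ ?_
  · rw [List.perm_ext_iff_of_nodup
      ((PySem.List.nodup_pyRange_one 0 n).filter _) (PySem.Set.nodup_ofList _)]
    intro j
    rw [PySem.Set.mem_ofList, List.mem_filter, List.mem_flatMap]
    simp only [PySem.List.mem_pyRange_one, List.any_eq_true, List.mem_map,
      decide_eq_true_eq, Bool.and_eq_true]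
    constructor
    · rintro ⟨⟨h0, hjn⟩, a, ⟨p, hp, rfl⟩, haj, hja⟩
      exact ⟨p, hp, by rw [pvRng, PySem.List.mem_pyRange_one]; exact ⟨haj, lt_min hja hjn⟩⟩
    · rintro ⟨p, hp, hj⟩
      rw [pvRng, PySem.List.mem_pyRange_one] at hj
      have hp' : p ∈ pvAnchors pages := List.mem_of_mem_take (ht4' ▸ hp)
      have h0p : 0 ≤ p.1 := pvAnchors_nonneg pages p hp'
      have hmin := hj.2
      rw [lt_min_iff] at hmin
      exact ⟨⟨le_trans h0p hj.1, hmin.2⟩, p.1, ⟨p, hp, rfl⟩, hj.1, hmin.1⟩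
  · exact (PySem.List.pairwise_lt_pyRange_one 0 n).filter _

-- ===== VERDICT (by name: the statement is the Claim_ definition above) =====
theorem find_financial_section_pages_spec : Claim_equal_find_financial_section_pages := by
  intro pages _
  unfold Spec_find_financial_section_pages
  exact pv_main pages
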